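-- pv_equiv track=rewrite | github.com/sjsjmine129/PS_2023 | 2023Kakao/3.py | solution
-- ===== SOURCE A (Python) =====
-- def solution(dice):
--     n = len(dice)
--     if n == 2:
--         a = sum(dice[0])
--         b = sum(dice[1])
--         if a > b:
--             return [1]
--         elif a < b:
--             return [2]
--
--     if n == 4:
--         a_1 = [dice[0], dice[1]]
--         a_2 = [dice[2], dice[3]]
--
--         b_1 = [dice[0], dice[2]]
--         b_2 = [dice[1], dice[3]]
--
--         c_1 = [dice[0], dice[3]]
--         c_2 = [dice[1], dice[2]]
--
--         a_1_can = []
--         a_2_can = []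
--         b_1_can = []
--         b_2_can = []
--         c_1_can = []
--         c_2_can = []
--
--         for i in range(6):
--             for j in range(6):
--                 a_1_can.append(a_1[0][i]+a_1[1][j])
--                 a_2_can.append(a_2[0][i]+a_2[1][j])
--                 b_1_can.append(b_1[0][i]+b_1[1][j])
--                 b_2_can.append(b_2[0][i]+b_2[1][j])
--                 c_1_can.append(c_1[0][i]+c_1[1][j])
--                 c_2_can.append(c_2[0][i]+c_2[1][j])
--
--         a_1_win = 0
--         a_2_win = 0
--         b_1_win = 0
--         b_2_win = 0
--         c_1_win = 0
--         c_2_win = 0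
--
--         for i in range(36):
--             for j in range(36):
--                 if a_1_can[i] > a_2_can[j]:
--                     a_1_win += 1
--                 if a_1_can[i] < a_2_can[j]:
--                     a_2_win += 1
--                 if b_1_can[i] > b_2_can[j]:
--                     b_1_win += 1
--                 if b_1_can[i] < b_2_can[j]:
--                     b_2_win += 1
--                 if c_1_can[i] > c_2_can[j]:
--                     c_1_win += 1
--                 if c_1_can[i] < c_2_can[j]:
--                     c_2_win += 1
--
--         m = max(a_1_win, a_2_win, b_1_win, b_2_win, c_1_win, c_2_win)
--
--         if m == a_1_win:
--             return [1, 2]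
--         elif m == a_2_win:
--             return [3, 4]
--         elif m == b_1_win:
--             return [1, 3]
--         elif m == b_2_win:
--             return [2, 4]
--         elif m == c_1_win:
--             return [1, 4]
--         elif m == c_2_win:
--             return [2, 3]
-- ===== SOURCE B (Python) =====
-- def solution(dice):
--     n = len(dice)
--     if n == 2:
--         a = sum(dice[0])
--         b = sum(dice[1])
--         if a > b:
--             return [1]
--         if a < b:
--             return [2]
--         return None
--     if n != 4:
--         return None
--
--     def sums(p, q):
--         # all 36 pairwise face sums, sorted (raises IndexError, like A, on short dice)
--         return sorted(dice[p][i] + dice[q][j] for i in range(6) for j in range(6))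
--
--     def beats(s1, s2):
--         # s1, s2 sorted ascending; count pairs (x, y), x from s1, y from s2, x > y
--         j = 0
--         total = 0
--         for x in s1:
--             while j < len(s2) and s2[j] < x:
--                 j += 1
--             total += j
--         return total
--
--     cands = []
--     for (p, q), (r, s), lab1, lab2 in [((0, 1), (2, 3), [1, 2], [3, 4]),
--                                        ((0, 2), (1, 3), [1, 3], [2, 4]),
--                                        ((0, 3), (1, 2), [1, 4], [2, 3])]:
--         s1 = sums(p, q)
--         s2 = sums(r, s)
--         cands.append((beats(s1, s2), lab1))
--         cands.append((beats(s2, s1), lab2))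
--     return max(cands, key=lambda t: t[0])[1]
-- ===== Notes on version B (the rewrite author's own statement) =====
-- stated objective: alternative
-- what changed: Replaces A's O(36^2) all-pairs double loop for each matchup's win counts by sorting each 36-sum list once and counting strictly-smaller opponents with a single two-pointer merge scan, then picking the max-win pair with the same preference order.
import Mathlib
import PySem

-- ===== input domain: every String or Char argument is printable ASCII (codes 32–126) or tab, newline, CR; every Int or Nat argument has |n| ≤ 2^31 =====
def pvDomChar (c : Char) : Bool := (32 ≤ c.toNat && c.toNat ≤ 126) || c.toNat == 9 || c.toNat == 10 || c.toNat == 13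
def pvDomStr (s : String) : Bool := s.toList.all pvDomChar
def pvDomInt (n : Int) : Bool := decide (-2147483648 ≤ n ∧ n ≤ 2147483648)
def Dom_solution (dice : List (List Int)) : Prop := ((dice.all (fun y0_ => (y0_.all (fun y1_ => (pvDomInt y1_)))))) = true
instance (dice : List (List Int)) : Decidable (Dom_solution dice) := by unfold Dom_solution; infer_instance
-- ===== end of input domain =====

-- B replaces A's O(36^2) pairwise win-count double loop by sorting each 36-sum list once and
-- counting with a two-pointer merge scan; return values are identical on Pre_ (both programs
-- raise IndexError when n=4 and a die has fewer than 6 faces, which Pre_ excludes).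

-- ===== PORT A =====
-- A's three n=4 loops, each transliterated as a named fold (the let-bound pair lists become
-- parameters); solution composes them exactly as the Python does
def pvCansF (a1 a2 b1 b2 c1 c2 : List (List Int)) :
    List Int × List Int × List Int × List Int × List Int × List Int :=
  (PySem.List.pyRange 0 6).foldl (fun s i =>
    (PySem.List.pyRange 0 6).foldl
      (fun (s : List Int × List Int × List Int × List Int × List Int × List Int) j =>
        (s.1 ++ [PySem.List.pyGetD (PySem.List.pyGetD a1 0 []) i 0 + PySem.List.pyGetD (PySem.List.pyGetD a1 1 []) j 0],
         s.2.1 ++ [PySem.List.pyGetD (PySem.List.pyGetD a2 0 []) i 0 + PySem.List.pyGetD (PySem.List.pyGetD a2 1 []) j 0],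
         s.2.2.1 ++ [PySem.List.pyGetD (PySem.List.pyGetD b1 0 []) i 0 + PySem.List.pyGetD (PySem.List.pyGetD b1 1 []) j 0],
         s.2.2.2.1 ++ [PySem.List.pyGetD (PySem.List.pyGetD b2 0 []) i 0 + PySem.List.pyGetD (PySem.List.pyGetD b2 1 []) j 0],
         s.2.2.2.2.1 ++ [PySem.List.pyGetD (PySem.List.pyGetD c1 0 []) i 0 + PySem.List.pyGetD (PySem.List.pyGetD c1 1 []) j 0],
         s.2.2.2.2.2 ++ [PySem.List.pyGetD (PySem.List.pyGetD c2 0 []) i 0 + PySem.List.pyGetD (PySem.List.pyGetD c2 1 []) j 0]))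
      s)
    (([], [], [], [], [], []) : List Int × List Int × List Int × List Int × List Int × List Int)

def pvWinsF (cans : List Int × List Int × List Int × List Int × List Int × List Int) :
    Int × Int × Int × Int × Int × Int :=
  (PySem.List.pyRange 0 36).foldl (fun w i =>
    (PySem.List.pyRange 0 36).foldl
      (fun (w : Int × Int × Int × Int × Int × Int) j =>
        (if PySem.List.pyGetD cans.1 i 0 > PySem.List.pyGetD cans.2.1 j 0 then w.1 + 1 else w.1,
         if PySem.List.pyGetD cans.1 i 0 < PySem.List.pyGetD cans.2.1 j 0 then w.2.1 + 1 else w.2.1,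
         if PySem.List.pyGetD cans.2.2.1 i 0 > PySem.List.pyGetD cans.2.2.2.1 j 0 then w.2.2.1 + 1 else w.2.2.1,
         if PySem.List.pyGetD cans.2.2.1 i 0 < PySem.List.pyGetD cans.2.2.2.1 j 0 then w.2.2.2.1 + 1 else w.2.2.2.1,
         if PySem.List.pyGetD cans.2.2.2.2.1 i 0 > PySem.List.pyGetD cans.2.2.2.2.2 j 0 then w.2.2.2.2.1 + 1 else w.2.2.2.2.1,
         if PySem.List.pyGetD cans.2.2.2.2.1 i 0 < PySem.List.pyGetD cans.2.2.2.2.2 j 0 then w.2.2.2.2.2 + 1 else w.2.2.2.2.2))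
      w)
    ((0, 0, 0, 0, 0, 0) : Int × Int × Int × Int × Int × Int)

def pvPick (wins : Int × Int × Int × Int × Int × Int) : Option (List Int) :=
  let m := max wins.1 (max wins.2.1 (max wins.2.2.1 (max wins.2.2.2.1 (max wins.2.2.2.2.1 wins.2.2.2.2.2))))
  if m = wins.1 then some [1, 2]
  else if m = wins.2.1 then some [3, 4]
  else if m = wins.2.2.1 then some [1, 3]
  else if m = wins.2.2.2.1 then some [2, 4]
  else if m = wins.2.2.2.2.1 then some [1, 4]
  else if m = wins.2.2.2.2.2 then some [2, 3]
  else none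

def solution (dice : List (List Int)) : Option (List Int) :=
  let n := dice.length
  let early : Option (Option (List Int)) :=
    if n = 2 then
      let a := (PySem.List.pyGetD dice 0 []).sum
      let b := (PySem.List.pyGetD dice 1 []).sum
      if a > b then some (some [1])
      else if a < b then some (some [2])
      else none
    else none
  early.getD <|
    if n = 4 then
      let a1 : List (List Int) := [PySem.List.pyGetD dice 0 [], PySem.List.pyGetD dice 1 []]
      let a2 : List (List Int) := [PySem.List.pyGetD dice 2 [], PySem.List.pyGetD dice 3 []]
      let b1 : List (List Int) := [PySem.List.pyGetD dice 0 [], PySem.List.pyGetD dice 2 []]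
      let b2 : List (List Int) := [PySem.List.pyGetD dice 1 [], PySem.List.pyGetD dice 3 []]
      let c1 : List (List Int) := [PySem.List.pyGetD dice 0 [], PySem.List.pyGetD dice 3 []]
      let c2 : List (List Int) := [PySem.List.pyGetD dice 1 [], PySem.List.pyGetD dice 2 []]
      pvPick (pvWinsF (pvCansF a1 a2 b1 b2 c1 c2))
    else none

-- ===== PORT B =====
-- sums(p, q) of Source B: the 36 pairwise face sums dice[p][i]+dice[q][j], sorted ascending
-- (the Python indexing raises IndexError on a die with fewer than 6 faces, outside Pre_;
-- pyGetD's default is never reached inside Pre_)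
def pvSortedSums (dx dy : List Int) : List Int :=
  PySem.List.sorted
    ((PySem.List.pyRange 0 6).flatMap
      (fun i => (PySem.List.pyRange 0 6).map
        (fun j => PySem.List.pyGetD dx i 0 + PySem.List.pyGetD dy j 0)))
    (fun z => z) false

-- the 'while j < len(s2) and s2[j] < x: j += 1' loop of beats (fuel = remaining length,
-- which bounds the number of iterations exactly)
def pvAdvanceAux (s2 : List Int) (x : Int) : Nat -> Nat -> Nat
  | j, 0 => j
  | j, fuel + 1 =>
    if h : j < s2.length then
      if s2[j] < x then pvAdvanceAux s2 x (j + 1) fuel else j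
    else j

def pvAdvance (s2 : List Int) (x : Int) (j : Nat) : Nat :=
  pvAdvanceAux s2 x j (s2.length - j)

-- beats(s1, s2) of Source B: two-pointer count of pairs (x, y) with x > y, both lists sorted
def pvBeats (s1 s2 : List Int) : Int :=
  (s1.foldl (fun (st : Nat × Int) x =>
      let j := pvAdvance s2 x st.1
      (j, st.2 + (j : Int))) (0, 0)).2

def pvBBody (d0 d1 d2 d3 : List Int) : Option (List Int) :=
  let sA1 := pvSortedSums (d0) (d1)
  let sA2 := pvSortedSums (d2) (d3)
  let sB1 := pvSortedSums (d0) (d2)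
  let sB2 := pvSortedSums (d1) (d3)
  let sC1 := pvSortedSums (d0) (d3)
  let sC2 := pvSortedSums (d1) (d2)
  let cands : List (Int × List Int) :=
    [(pvBeats sA1 sA2, [1, 2]), (pvBeats sA2 sA1, [3, 4]),
     (pvBeats sB1 sB2, [1, 3]), (pvBeats sB2 sB1, [2, 4]),
     (pvBeats sC1 sC2, [1, 4]), (pvBeats sC2 sC1, [2, 3])]
  match PySem.List.max? cands (fun t => t.1) with
  | some t => some t.2
  | none => none

def solution_alt (dice : List (List Int)) : Option (List Int) :=
  let n := dice.length
  if n = 2 then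
    let a := (PySem.List.pyGetD dice 0 []).sum
    let b := (PySem.List.pyGetD dice 1 []).sum
    if a > b then some [1]
    else if a < b then some [2]
    else none
  else if n ≠ 4 then none
  else
    pvBBody (PySem.List.pyGetD dice 0 []) (PySem.List.pyGetD dice 1 [])
      (PySem.List.pyGetD dice 2 []) (PySem.List.pyGetD dice 3 [])

-- ===== PRECONDITION & SPEC =====
-- Pre_ excludes exactly the inputs where A (and B) raise IndexError: four dice of which some has fewer than six faces.
def Pre_solution (dice : List (List Int)) : Prop :=
  dice.length = 4 → ∀ d ∈ dice, 6 ≤ d.length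
instance (dice : List (List Int)) : Decidable (Pre_solution dice) := by unfold Pre_solution; infer_instance

def pvWitness_solution : List (List Int) :=
  [[1, 2, 3, 4, 5, 6], [1, 2, 3, 4, 5, 6], [1, 2, 3, 4, 5, 6], [2, 2, 2, 2, 2, 2]]

def Spec_solution (dice : List (List Int)) (out : Option (List Int)) : Prop := out = solution_alt dice
instance (dice : List (List Int)) (out : Option (List Int)) : Decidable (Spec_solution dice out) := by unfold Spec_solution; infer_instance

-- ===== CLAIM (what is proved, stated in full; the proofs are below) =====
def Claim_equal_solution : Prop := ∀ (dice : List (List Int)), Dom_solution dice → Pre_solution dice → Spec_solution dice (solution dice)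

-- ===== LEMMAS AND PROOFS =====

-- inner can-building loop: 6 independent append accumulators
theorem pv_inner_append6 {α : Type} (g1 g2 g3 g4 g5 g6 : α → Int) :
    ∀ (l : List α) (s : List Int × List Int × List Int × List Int × List Int × List Int),
    l.foldl (fun s j =>
      (s.1 ++ [g1 j], s.2.1 ++ [g2 j], s.2.2.1 ++ [g3 j], s.2.2.2.1 ++ [g4 j],
       s.2.2.2.2.1 ++ [g5 j], s.2.2.2.2.2 ++ [g6 j])) s
    = (s.1 ++ l.map g1, s.2.1 ++ l.map g2, s.2.2.1 ++ l.map g3, s.2.2.2.1 ++ l.map g4,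
       s.2.2.2.2.1 ++ l.map g5, s.2.2.2.2.2 ++ l.map g6) := by
  intro l
  induction l with
  | nil => simp
  | cons a t ih => intro s; simp [List.foldl_cons, ih]

theorem pv_outer_append6 {α : Type} (F1 F2 F3 F4 F5 F6 : α → List Int) :
    ∀ (l : List α) (s : List Int × List Int × List Int × List Int × List Int × List Int),
    l.foldl (fun s i =>
      (s.1 ++ F1 i, s.2.1 ++ F2 i, s.2.2.1 ++ F3 i, s.2.2.2.1 ++ F4 i,
       s.2.2.2.2.1 ++ F5 i, s.2.2.2.2.2 ++ F6 i)) s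
    = (s.1 ++ l.flatMap F1, s.2.1 ++ l.flatMap F2, s.2.2.1 ++ l.flatMap F3,
       s.2.2.2.1 ++ l.flatMap F4, s.2.2.2.2.1 ++ l.flatMap F5, s.2.2.2.2.2 ++ l.flatMap F6) := by
  intro l
  induction l with
  | nil => simp
  | cons a t ih => intro s; simp [List.foldl_cons, ih]

-- inner win loop: 6 independent conditional counters
theorem pv_inner_count6 {α : Type} (p1 p2 p3 p4 p5 p6 : α → Prop)
    [DecidablePred p1] [DecidablePred p2] [DecidablePred p3] [DecidablePred p4]
    [DecidablePred p5] [DecidablePred p6] :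
    ∀ (l : List α) (w : Int × Int × Int × Int × Int × Int),
    l.foldl (fun w j =>
      (if p1 j then w.1 + 1 else w.1,
       if p2 j then w.2.1 + 1 else w.2.1,
       if p3 j then w.2.2.1 + 1 else w.2.2.1,
       if p4 j then w.2.2.2.1 + 1 else w.2.2.2.1,
       if p5 j then w.2.2.2.2.1 + 1 else w.2.2.2.2.1,
       if p6 j then w.2.2.2.2.2 + 1 else w.2.2.2.2.2)) w
    = (w.1 + l.countP (fun j => decide (p1 j)),
       w.2.1 + l.countP (fun j => decide (p2 j)),
       w.2.2.1 + l.countP (fun j => decide (p3 j)),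
       w.2.2.2.1 + l.countP (fun j => decide (p4 j)),
       w.2.2.2.2.1 + l.countP (fun j => decide (p5 j)),
       w.2.2.2.2.2 + l.countP (fun j => decide (p6 j))) := by
  intro l
  induction l with
  | nil => simp
  | cons a t ih =>
    intro w
    simp only [List.foldl_cons, ih, List.countP_cons]
    refine Prod.ext ?_ (Prod.ext ?_ (Prod.ext ?_ (Prod.ext ?_ (Prod.ext ?_ ?_)))) <;>
      simp <;> split_ifs <;> push_cast <;> ring

theorem pv_outer_add6 {α : Type} (c1 c2 c3 c4 c5 c6 : α → Int) :
    ∀ (l : List α) (w : Int × Int × Int × Int × Int × Int),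
    l.foldl (fun w i =>
      (w.1 + c1 i, w.2.1 + c2 i, w.2.2.1 + c3 i, w.2.2.2.1 + c4 i,
       w.2.2.2.2.1 + c5 i, w.2.2.2.2.2 + c6 i)) w
    = (w.1 + (l.map c1).sum, w.2.1 + (l.map c2).sum, w.2.2.1 + (l.map c3).sum,
       w.2.2.2.1 + (l.map c4).sum, w.2.2.2.2.1 + (l.map c5).sum, w.2.2.2.2.2 + (l.map c6).sum) := by
  intro l
  induction l with
  | nil => simp
  | cons a t ih =>
    intro w
    simp only [List.foldl_cons, ih, List.map_cons, List.sum_cons]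
    refine Prod.ext ?_ (Prod.ext ?_ (Prod.ext ?_ (Prod.ext ?_ (Prod.ext ?_ ?_)))) <;> simp <;> ring

def pvCnt (s2 : List Int) (x : Int) : Nat := s2.countP (fun y => decide (y < x))

-- on a nondecreasing list, the elements below x are exactly the first pvCnt ones
theorem pv_cnt_iff (x : Int) :
    ∀ (s2 : List Int), s2.Pairwise (· ≤ ·) →
      ∀ k, (hk : k < s2.length) → (k < pvCnt s2 x ↔ s2[k] < x) := by
  intro s2
  induction s2 with
  | nil => intro _ k hk; simp at hk
  | cons a t ih =>
    intro hp k hk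
    have hat := (List.pairwise_cons.mp hp).1
    have ht := (List.pairwise_cons.mp hp).2
    by_cases hax : a < x
    · cases k with
      | zero => simpa [pvCnt, List.countP_cons, hax] using Nat.succ_pos _
      | succ k =>
        have hk' : k < t.length := by simpa using hk
        have := ih ht k hk'
        simp only [pvCnt, List.countP_cons, hax] at *
        simpa [Nat.succ_lt_succ_iff] using this
    · have htz : t.countP (fun y => decide (y < x)) = 0 := by
        rw [List.countP_eq_zero]
        intro y hy
        simp only [decide_eq_true_eq]
        exact fun hyx => hax (lt_of_le_of_lt (hat y hy) hyx)
      have hcz : pvCnt (a :: t) x = 0 := by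
        simp [pvCnt, List.countP_cons, hax, htz]
      rw [hcz]
      simp only [Nat.not_lt_zero, false_iff]
      cases k with
      | zero => simpa using hax
      | succ k =>
        have hk' : k < t.length := by simpa using hk
        intro hlt
        have : t.countP (fun y => decide (y < x)) ≠ 0 := by
          have := (ih ht k hk').mpr (by simpa using hlt)
          simp only [pvCnt] at this
          omega
        exact this htz

theorem pv_cnt_le_len (s2 : List Int) (x : Int) : pvCnt s2 x ≤ s2.length :=
  List.countP_le_length

theorem pv_advanceAux_eq (s2 : List Int) (x : Int) (hs : s2.Pairwise (· ≤ ·)) :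
    ∀ (fuel j : Nat), j ≤ pvCnt s2 x → pvCnt s2 x ≤ j + fuel → pvAdvanceAux s2 x j fuel = pvCnt s2 x := by
  intro fuel
  induction fuel with
  | zero => intro j h1 h2; simp [pvAdvanceAux]; omega
  | succ n ih =>
    intro j h1 h2
    rw [pvAdvanceAux]
    by_cases hj : j < s2.length
    · simp only [hj, dif_pos]
      by_cases hlt : s2[j] < x
      · have : j < pvCnt s2 x := (pv_cnt_iff x s2 hs j hj).mpr hlt
        rw [if_pos hlt]
        exact ih (j+1) (by omega) (by omega)
      · have : ¬ j < pvCnt s2 x := fun h => hlt ((pv_cnt_iff x s2 hs j hj).mp h)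
        rw [if_neg hlt]
        omega
    · have := pv_cnt_le_len s2 x
      simp only [hj, dif_neg, not_false_iff]
      omega

theorem pv_advance_eq (s2 : List Int) (x : Int) (hs : s2.Pairwise (· ≤ ·))
    (j : Nat) (hj : j ≤ pvCnt s2 x) : pvAdvance s2 x j = pvCnt s2 x := by
  have := pv_cnt_le_len s2 x
  exact pv_advanceAux_eq s2 x hs _ j hj (by omega)

theorem pv_cnt_mono (s2 : List Int) {x y : Int} (h : x ≤ y) : pvCnt s2 x ≤ pvCnt s2 y := by
  apply List.countP_mono_left
  intro a _
  simp only [decide_eq_true_eq]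
  omega

theorem pv_beats_fold (s2 : List Int) (hs2 : s2.Pairwise (· ≤ ·)) :
    ∀ (s1 : List Int), s1.Pairwise (· ≤ ·) →
    ∀ (j : Nat) (t : Int), (∀ x ∈ s1, j ≤ pvCnt s2 x) →
    (s1.foldl (fun (st : Nat × Int) x =>
      let j := pvAdvance s2 x st.1
      (j, st.2 + (j : Int))) (j, t)).2 = t + (s1.map (fun x => (pvCnt s2 x : Int))).sum := by
  intro s1
  induction s1 with
  | nil => intro _ j t _; simp
  | cons x r ih =>
    intro hp j t hall
    have hxr := (List.pairwise_cons.mp hp).1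
    have hr := (List.pairwise_cons.mp hp).2
    simp only [List.foldl_cons]
    have hadv : pvAdvance s2 x j = pvCnt s2 x := pv_advance_eq s2 x hs2 j (hall x (by simp))
    simp only [hadv]
    rw [ih hr (pvCnt s2 x) (t + (pvCnt s2 x : Int))
        (fun y hy => pv_cnt_mono s2 (hxr y hy))]
    simp [add_assoc]

theorem pv_beats_eq (s1 s2 : List Int) (hs1 : s1.Pairwise (· ≤ ·)) (hs2 : s2.Pairwise (· ≤ ·)) :
    pvBeats s1 s2 = (s1.map (fun x => (pvCnt s2 x : Int))).sum := by
  have := pv_beats_fold s2 hs2 s1 hs1 0 0 (fun x _ => Nat.zero_le _)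
  simpa [pvBeats] using this

-- sum over the sorted copies equals the sum over the originals
theorem pv_sum_cnt_sorted (l1 l2 : List Int) :
    ((PySem.List.sorted l1 (fun z => z) false).map
        (fun x => (pvCnt (PySem.List.sorted l2 (fun z => z) false) x : Int))).sum
      = (l1.map (fun x => (pvCnt l2 x : Int))).sum := by
  have h2 : ∀ x, pvCnt (PySem.List.sorted l2 (fun z => z) false) x = pvCnt l2 x := by
    intro x
    exact (PySem.List.sorted_perm l2 (fun z => z) false).countP_eq _
  have h1 : ((PySem.List.sorted l1 (fun z => z) false).map
      (fun x => (pvCnt l2 x : Int))).sum = (l1.map (fun x => (pvCnt l2 x : Int))).sum :=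
    ((PySem.List.sorted_perm l1 (fun z => z) false).map _).sum_eq
  simp only [h2]
  exact h1

theorem pv_sorted_pairwise_le (l : List Int) :
    (PySem.List.sorted l (fun z => z) false).Pairwise (· ≤ ·) := by
  have := PySem.List.sorted_pairwise (xs := l) (key := fun z => z)
  simpa using this

-- first six faces, by index and by take
theorem pv_take6 (d : List Int) (h : 6 ≤ d.length) :
    (PySem.List.pyRange 0 6).map (fun i => PySem.List.pyGetD d i 0) = d.take 6 := by
  match d, h with
  | a :: b :: c :: e :: f :: g :: r, _ =>
    have hr : PySem.List.pyRange 0 6 = [0, 1, 2, 3, 4, 5] := by decide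
    rw [hr]
    simp [pysem]

def pvG {α : Type} (a b : Int × α) : Int × α := if a.1 < b.1 then b else a

theorem pv_max?_cons {α : Type} (p a : Int × α) (t : List (Int × α)) :
    PySem.List.max? (p :: a :: t) (fun x => x.1)
    = PySem.List.max? (pvG p a :: t) (fun x => x.1) := by
  by_cases h : p.1 < a.1 <;> simp [PySem.List.max?, List.foldl_cons, pvG, h]

theorem pv_max?_cons_fold {α : Type} :
    ∀ (t : List (Int × α)) (p : Int × α),
    PySem.List.max? (p :: t) (fun x => x.1) = some (t.foldl pvG p) := by
  intro t
  induction t with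
  | nil => intro p; simp [PySem.List.max?, List.foldl]
  | cons a t ih => intro p; rw [pv_max?_cons, ih, List.foldl_cons]

theorem pv_max?_six {α : Type} (p1 p2 p3 p4 p5 p6 : Int × α) :
    PySem.List.max? [p1, p2, p3, p4, p5, p6] (fun t => t.1)
    = some (pvG (pvG (pvG (pvG (pvG p1 p2) p3) p4) p5) p6) := by
  rw [pv_max?_cons_fold]
  simp [List.foldl]

set_option maxHeartbeats 3200000 in
theorem pv_select6 {α : Type} (w1 w2 w3 w4 w5 w6 : Int) (l1 l2 l3 l4 l5 l6 : α) :
    (if max w1 (max w2 (max w3 (max w4 (max w5 w6)))) = w1 then some l1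
     else if max w1 (max w2 (max w3 (max w4 (max w5 w6)))) = w2 then some l2
     else if max w1 (max w2 (max w3 (max w4 (max w5 w6)))) = w3 then some l3
     else if max w1 (max w2 (max w3 (max w4 (max w5 w6)))) = w4 then some l4
     else if max w1 (max w2 (max w3 (max w4 (max w5 w6)))) = w5 then some l5
     else if max w1 (max w2 (max w3 (max w4 (max w5 w6)))) = w6 then some l6
     else none)
    = some ((pvG (pvG (pvG (pvG (pvG (w1, l1) (w2, l2)) (w3, l3)) (w4, l4)) (w5, l5)) (w6, l6)).2) := by
  simp only [pvG]
  split_ifs <;>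
    first
      | rfl
      | (exfalso; omega)

-- inner index-count equals element count
theorem pv_idx_countP (Y : List Int) (p : Int → Bool) :
    (PySem.List.pyRange 0 (PySem.List.len Y)).countP (fun j => p (PySem.List.pyGetD Y j 0))
    = Y.countP p := by
  conv_rhs => rw [← PySem.List.map_pyGetD_pyRange_zero (xs := Y) (d := 0)]
  rw [List.countP_map]
  rfl

-- outer index-map-sum equals element-map-sum
theorem pv_idx_sum (X : List Int) (g : Int → Int) :
    ((PySem.List.pyRange 0 (PySem.List.len X)).map (fun i => g (PySem.List.pyGetD X i 0))).sum
    = (X.map g).sum := by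
  conv_rhs => rw [← PySem.List.map_pyGetD_pyRange_zero (xs := X) (d := 0)]
  rw [List.map_map]
  rfl

def pvPairs (da db : List Int) : List Int :=
  (da.take 6).flatMap (fun x => (db.take 6).map (fun y => x + y))

theorem pv_can_eq (da db : List Int) (ha : 6 ≤ da.length) (hb : 6 ≤ db.length) :
    (PySem.List.pyRange 0 6).flatMap
      (fun i => (PySem.List.pyRange 0 6).map
        (fun j => PySem.List.pyGetD da i 0 + PySem.List.pyGetD db j 0))
    = pvPairs da db := by
  unfold pvPairs
  rw [← pv_take6 da ha, ← pv_take6 db hb]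
  rw [List.flatMap_map]
  rfl

theorem pv_pairs_len (da db : List Int) (ha : 6 ≤ da.length) (hb : 6 ≤ db.length) :
    PySem.List.len (pvPairs da db) = 36 := by
  unfold pvPairs
  simp [PySem.List.len, List.length_flatMap]
  rw [min_eq_left (by omega : (6:Int) ≤ da.length), min_eq_left (by omega : (6:Int) ≤ db.length)]
  norm_num

def pvCountGT (X Y : List Int) : Int := (X.map (fun x => (pvCnt Y x : Int))).sum
def pvCountLT (X Y : List Int) : Int := (X.map (fun x => (Y.countP (fun y => decide (x < y)) : Int))).sum

theorem pv_swap (X Y : List Int) : pvCountLT X Y = pvCountGT Y X := by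
  unfold pvCountLT pvCountGT pvCnt
  induction X with
  | nil => simp
  | cons x t ih =>
    simp only [List.map_cons, List.sum_cons, ih, List.countP_cons]
    have h : ∀ y : Int, ((t.countP (fun x => decide (x < y)) + if decide (x < y) = true then 1 else 0 : Nat) : Int)
        = ((t.countP (fun x => decide (x < y)) : Nat) : Int) + ((if x < y then (1:Int) else 0)) := by
      intro y; split_ifs <;> simp_all
    simp only [h]
    rw [PySem.List.sum_map_add_int]
    have h2 : (Y.map (fun y => if x < y then (1:Int) else 0)).sum = (Y.countP (fun y => decide (x < y)) : Int) := by
      rw [show (fun y : Int => if x < y then (1:Int) else 0) = (fun y : Int => if (fun y => decide (x < y)) y = true then (1:Int) else 0) from by funext y; simp]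
      rw [PySem.List.sum_map_ite_one_zero]
    rw [h2]
    ring

theorem pv_idx_inner_lt (Y : List Int) (x : Int) :
    (PySem.List.pyRange 0 ((Y.length : Nat) : Int)).countP (fun j => decide (PySem.List.pyGetD Y j 0 < x))
    = Y.countP (fun y => decide (y < x)) := pv_idx_countP Y (fun y => decide (y < x))

theorem pv_idx_inner_gt (Y : List Int) (x : Int) :
    (PySem.List.pyRange 0 ((Y.length : Nat) : Int)).countP (fun j => decide (x < PySem.List.pyGetD Y j 0))
    = Y.countP (fun y => decide (x < y)) := pv_idx_countP Y (fun y => decide (x < y))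

theorem pv_idx_sum_lt (X Y : List Int) :
    ((PySem.List.pyRange 0 ((X.length : Nat) : Int)).map
      (fun i => ((Y.countP (fun y => decide (y < PySem.List.pyGetD X i 0)) : Nat) : Int))).sum
    = (X.map (fun x => ((Y.countP (fun y => decide (y < x)) : Nat) : Int))).sum :=
  pv_idx_sum X (fun t => ((Y.countP (fun y => decide (y < t)) : Nat) : Int))

theorem pv_idx_sum_gt (X Y : List Int) :
    ((PySem.List.pyRange 0 ((X.length : Nat) : Int)).map
      (fun i => ((Y.countP (fun y => decide (PySem.List.pyGetD X i 0 < y)) : Nat) : Int))).sum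
    = (X.map (fun x => ((Y.countP (fun y => decide (x < y)) : Nat) : Int))).sum :=
  pv_idx_sum X (fun t => ((Y.countP (fun y => decide (t < y)) : Nat) : Int))

theorem pv_Awin_gt (X Y : List Int) (hX : ((X.length : Nat) : Int) = 36) (hY : ((Y.length : Nat) : Int) = 36) :
    ((PySem.List.pyRange 0 36).map (fun i =>
      (((PySem.List.pyRange 0 36).countP
          (fun j => decide (PySem.List.pyGetD Y j 0 < PySem.List.pyGetD X i 0))) : Int))).sum
    = pvCountGT X Y := by
  rw [← hY]
  simp only [pv_idx_inner_lt]
  rw [hY, ← hX, pv_idx_sum_lt]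
  rfl

theorem pv_Awin_lt (X Y : List Int) (hX : ((X.length : Nat) : Int) = 36) (hY : ((Y.length : Nat) : Int) = 36) :
    ((PySem.List.pyRange 0 36).map (fun i =>
      (((PySem.List.pyRange 0 36).countP
          (fun j => decide (PySem.List.pyGetD X i 0 < PySem.List.pyGetD Y j 0))) : Int))).sum
    = pvCountGT Y X := by
  rw [← hY]
  simp only [pv_idx_inner_gt]
  rw [hY, ← hX, pv_idx_sum_gt]
  exact pv_swap X Y

theorem pv_beats_bridge (L1 L2 : List Int) :
    pvBeats (PySem.List.sorted L1 (fun z => z) false) (PySem.List.sorted L2 (fun z => z) false)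
    = pvCountGT L1 L2 := by
  rw [pv_beats_eq _ _ (pv_sorted_pairwise_le L1) (pv_sorted_pairwise_le L2)]
  exact pv_sum_cnt_sorted L1 L2

theorem pv_ssums_eq (dx dy : List Int) (ha : 6 ≤ dx.length) (hb : 6 ≤ dy.length) :
    pvSortedSums dx dy = PySem.List.sorted (pvPairs dx dy) (fun z => z) false := by
  unfold pvSortedSums
  rw [pv_can_eq dx dy ha hb]

def pvABody (d0 d1 d2 d3 : List Int) : Option (List Int) :=
  pvPick (pvWinsF (pvCansF [d0, d1] [d2, d3] [d0, d2] [d1, d3] [d0, d3] [d1, d2]))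

theorem pv_get2_0 (x y : List Int) : PySem.List.pyGetD [x, y] 0 ([] : List Int) = x := rfl
theorem pv_get2_1 (x y : List Int) : PySem.List.pyGetD [x, y] 1 ([] : List Int) = y := rfl

theorem pvCansF_eq (d0 d1 d2 d3 : List Int)
    (hl0 : 6 ≤ d0.length) (hl1 : 6 ≤ d1.length) (hl2 : 6 ≤ d2.length) (hl3 : 6 ≤ d3.length) :
    pvCansF [d0, d1] [d2, d3] [d0, d2] [d1, d3] [d0, d3] [d1, d2]
    = (pvPairs d0 d1, pvPairs d2 d3, pvPairs d0 d2, pvPairs d1 d3, pvPairs d0 d3, pvPairs d1 d2) := by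
  unfold pvCansF
  simp only [pv_get2_0, pv_get2_1]
  simp only [pv_inner_append6, pv_outer_append6, List.nil_append]
  rw [pv_can_eq _ _ hl0 hl1, pv_can_eq _ _ hl2 hl3, pv_can_eq _ _ hl0 hl2,
      pv_can_eq _ _ hl1 hl3, pv_can_eq _ _ hl0 hl3, pv_can_eq _ _ hl1 hl2]

theorem pvWinsF_eq (X1 Y1 X2 Y2 X3 Y3 : List Int)
    (h1 : ((X1.length : Nat) : Int) = 36) (h2 : ((Y1.length : Nat) : Int) = 36)
    (h3 : ((X2.length : Nat) : Int) = 36) (h4 : ((Y2.length : Nat) : Int) = 36)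
    (h5 : ((X3.length : Nat) : Int) = 36) (h6 : ((Y3.length : Nat) : Int) = 36) :
    pvWinsF (X1, Y1, X2, Y2, X3, Y3)
    = (pvCountGT X1 Y1, pvCountGT Y1 X1, pvCountGT X2 Y2,
       pvCountGT Y2 X2, pvCountGT X3 Y3, pvCountGT Y3 X3) := by
  unfold pvWinsF
  dsimp only
  simp only [pv_inner_count6, pv_outer_add6, zero_add, gt_iff_lt]
  rw [pv_Awin_gt _ _ h1 h2, pv_Awin_lt _ _ h1 h2, pv_Awin_gt _ _ h3 h4, pv_Awin_lt _ _ h3 h4,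
      pv_Awin_gt _ _ h5 h6, pv_Awin_lt _ _ h5 h6]

theorem pvPick_select (w1 w2 w3 w4 w5 w6 : Int) :
    pvPick (w1, w2, w3, w4, w5, w6)
    = some ((pvG (pvG (pvG (pvG (pvG (w1, ([1, 2] : List Int)) (w2, [3, 4])) (w3, [1, 3])) (w4, [2, 4])) (w5, [1, 4])) (w6, [2, 3])).2) := by
  unfold pvPick
  exact pv_select6 w1 w2 w3 w4 w5 w6 [1, 2] [3, 4] [1, 3] [2, 4] [1, 4] [2, 3]

theorem pvBBody_eq (d0 d1 d2 d3 : List Int)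
    (hl0 : 6 ≤ d0.length) (hl1 : 6 ≤ d1.length) (hl2 : 6 ≤ d2.length) (hl3 : 6 ≤ d3.length) :
    pvBBody d0 d1 d2 d3
    = some ((pvG (pvG (pvG (pvG (pvG (pvCountGT (pvPairs d0 d1) (pvPairs d2 d3), ([1, 2] : List Int))
        (pvCountGT (pvPairs d2 d3) (pvPairs d0 d1), [3, 4]))
        (pvCountGT (pvPairs d0 d2) (pvPairs d1 d3), [1, 3]))
        (pvCountGT (pvPairs d1 d3) (pvPairs d0 d2), [2, 4]))
        (pvCountGT (pvPairs d0 d3) (pvPairs d1 d2), [1, 4]))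
        (pvCountGT (pvPairs d1 d2) (pvPairs d0 d3), [2, 3])).2) := by
  unfold pvBBody
  rw [pv_ssums_eq _ _ hl0 hl1, pv_ssums_eq _ _ hl2 hl3, pv_ssums_eq _ _ hl0 hl2,
      pv_ssums_eq _ _ hl1 hl3, pv_ssums_eq _ _ hl0 hl3, pv_ssums_eq _ _ hl1 hl2]
  simp only [pv_beats_bridge]
  rw [pv_max?_six]

theorem pv_body_eq (d0 d1 d2 d3 : List Int)
    (hl0 : 6 ≤ d0.length) (hl1 : 6 ≤ d1.length) (hl2 : 6 ≤ d2.length) (hl3 : 6 ≤ d3.length) :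
    pvABody d0 d1 d2 d3 = pvBBody d0 d1 d2 d3 := by
  unfold pvABody
  rw [pvCansF_eq d0 d1 d2 d3 hl0 hl1 hl2 hl3,
      pvWinsF_eq _ _ _ _ _ _ (pv_pairs_len _ _ hl0 hl1) (pv_pairs_len _ _ hl2 hl3)
        (pv_pairs_len _ _ hl0 hl2) (pv_pairs_len _ _ hl1 hl3)
        (pv_pairs_len _ _ hl0 hl3) (pv_pairs_len _ _ hl1 hl2),
      pvPick_select, pvBBody_eq d0 d1 d2 d3 hl0 hl1 hl2 hl3]

-- ===== VERDICT (by name: the statement is the Claim_ definition above) =====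
set_option maxHeartbeats 12000000 in
set_option maxRecDepth 100000 in
theorem solution_spec : Claim_equal_solution := by
  unfold Claim_equal_solution
  intro dice _ hpre
  unfold Spec_solution
  by_cases h2 : dice.length = 2
  · unfold solution solution_alt
    simp only [h2, if_pos, reduceIte]
    by_cases hab : (PySem.List.pyGetD dice 1 []).sum < (PySem.List.pyGetD dice 0 []).sum
    · simp [hab]
    · by_cases hba : (PySem.List.pyGetD dice 0 []).sum < (PySem.List.pyGetD dice 1 []).sum <;>
        simp [hab, hba]
  · by_cases h4 : dice.length = 4
    · have hp := hpre h4
      have hmem : ∀ k : Nat, k < dice.length → dice.getD k [] ∈ dice := by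
        intro k hk
        rw [List.getD_eq_getElem?_getD, List.getElem?_eq_getElem hk]
        exact List.getElem_mem hk
      have hl0 : 6 ≤ (PySem.List.pyGetD dice 0 ([] : List Int)).length := by
        rw [PySem.List.pyGetD_ofNat']; exact hp _ (hmem 0 (by omega))
      have hl1 : 6 ≤ (PySem.List.pyGetD dice 1 ([] : List Int)).length := by
        rw [PySem.List.pyGetD_ofNat']; exact hp _ (hmem 1 (by omega))
      have hl2 : 6 ≤ (PySem.List.pyGetD dice 2 ([] : List Int)).length := by
        rw [PySem.List.pyGetD_ofNat']; exact hp _ (hmem 2 (by omega))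
      have hl3 : 6 ≤ (PySem.List.pyGetD dice 3 ([] : List Int)).length := by
        rw [PySem.List.pyGetD_ofNat']; exact hp _ (hmem 3 (by omega))
      have hA : solution dice
          = pvABody (PySem.List.pyGetD dice 0 []) (PySem.List.pyGetD dice 1 [])
              (PySem.List.pyGetD dice 2 []) (PySem.List.pyGetD dice 3 []) := by
        unfold solution
        dsimp only []
        rw [if_neg h2, Option.getD_none, if_pos h4]
        rfl
      have hB : solution_alt dice
          = pvBBody (PySem.List.pyGetD dice 0 []) (PySem.List.pyGetD dice 1 [])
              (PySem.List.pyGetD dice 2 []) (PySem.List.pyGetD dice 3 []) := by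
        unfold solution_alt
        dsimp only []
        rw [if_neg h2, if_neg (show ¬(dice.length ≠ 4) from not_not_intro h4)]
      rw [hA, hB]
      exact pv_body_eq _ _ _ _ hl0 hl1 hl2 hl3
    · unfold solution solution_alt
      simp [h2, h4]
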